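-- pv_equiv track=rewrite | github.com/kentotakeuchi/data-structures-and-algorithms | leetcode/easy/check-if-matrix-is-x-matrix.py | checkXMatrix
-- ===== SOURCE A (Python) =====
-- from typing import List
--
-- def checkXMatrix(grid: List[List[int]]) -> bool:
--     for i in range(len(grid)):
--         for j in range(len(grid)):
--             if i == j or i+j == len(grid)-1:
--                 if grid[i][j] == 0:
--                     return False
--             else:
--                 if grid[i][j] > 0:
--                     return False
--     return True
-- ===== SOURCE B (Python) =====
-- def checkXMatrix(grid):
--     n = len(grid)
--     # a row too short to hold all n checked cells cannot form an X-matrix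
--     if any(len(row) < n for row in grid):
--         return False
--     # the only coordinates allowed to hold a positive value: both diagonals
--     allowed = {(i, i) for i in range(n)} | {(i, n - 1 - i) for i in range(n)}
--     # coordinates of every positive cell, collected once
--     positives = {(i, j) for i in range(n) for j in range(n) if grid[i][j] > 0}
--     if not positives <= allowed:
--         return False
--     # every diagonal cell must be nonzero (negatives are allowed there)
--     return all(grid[i][i] != 0 and grid[i][n - 1 - i] != 0 for i in range(n))
-- ===== Notes on version B (the rewrite author's own statement) =====
-- stated objective: alternative
-- what changed: A scans the grid cell by cell with a per-cell diagonal/off-diagonal branch and early returns; B instead materialises the set of coordinates of all positive cells and the set of allowed (diagonal) coordinates and decides by a set subset test, plus one diagonal nonzero scan.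
import Mathlib
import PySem

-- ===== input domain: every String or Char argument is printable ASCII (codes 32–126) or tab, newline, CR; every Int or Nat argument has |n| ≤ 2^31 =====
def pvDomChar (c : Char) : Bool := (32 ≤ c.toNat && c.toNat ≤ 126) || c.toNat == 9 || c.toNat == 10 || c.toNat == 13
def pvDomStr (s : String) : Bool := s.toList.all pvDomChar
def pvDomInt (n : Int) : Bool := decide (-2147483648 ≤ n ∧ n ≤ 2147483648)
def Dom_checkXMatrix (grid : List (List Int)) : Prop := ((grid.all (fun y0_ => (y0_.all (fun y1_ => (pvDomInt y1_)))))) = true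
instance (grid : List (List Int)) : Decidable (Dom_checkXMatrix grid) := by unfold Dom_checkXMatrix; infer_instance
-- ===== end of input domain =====

-- B replaces A's fused cell-by-cell branch-and-early-return scan by a set-based
-- formulation: the set of coordinates of positive cells must be a subset of the
-- set of diagonal coordinates, and every diagonal cell must be nonzero.

-- ===== PORT A =====
-- grid[i][j] for 0 ≤ i,j; inside Pre_ the indices are always in range, so
-- List.getD is exact (Python would raise IndexError exactly where getD defaults).
def pvCell (grid : List (List Int)) (i j : Nat) : Int := (grid.getD i []).getD j 0

-- inner 'for j in range(n)' with early return False
def pvAInner (grid : List (List Int)) (n i : Nat) : List Nat → Bool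
  | [] => true
  | j :: js =>
    if i = j ∨ i + j = n - 1 then
      if pvCell grid i j = 0 then false else pvAInner grid n i js
    else
      if pvCell grid i j > 0 then false else pvAInner grid n i js

-- outer 'for i in range(n)'
def pvAOuter (grid : List (List Int)) (n : Nat) : List Nat → Bool
  | [] => true
  | i :: is => pvAInner grid n i (List.range n) && pvAOuter grid n is

def checkXMatrix (grid : List (List Int)) : Bool :=
  pvAOuter grid grid.length (List.range grid.length)

-- ===== PORT B =====
-- {(i, i)} ∪ {(i, n-1-i)} — the coordinates allowed to hold a positive value
def pvAllowed (n : Nat) : PySem.Set (Nat × Nat) :=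
  PySem.Set.union
    (PySem.Set.ofList ((List.range n).map fun i => (i, i)))
    ((List.range n).map fun i => (i, n - 1 - i))

-- {(i, j) | grid[i][j] > 0} — coordinates of every positive cell
def pvPositives (grid : List (List Int)) (n : Nat) : PySem.Set (Nat × Nat) :=
  PySem.Set.ofList
    ((List.range n).flatMap fun i =>
      ((List.range n).filter fun j => decide (pvCell grid i j > 0)).map fun j => (i, j))

def checkXMatrix_alt (grid : List (List Int)) : Bool :=
  let n := grid.length
  if grid.any (fun row => row.length < n) then false
  else if ¬ PySem.Set.issubset (pvPositives grid n) (pvAllowed n) then false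
  else (List.range n).all fun i =>
    decide (pvCell grid i i ≠ 0) && decide (pvCell grid i (n - 1 - i) ≠ 0)

-- ===== PRECONDITION & SPEC =====
-- Pre_ holds exactly when Python A returns normally: for every row shorter than
-- n = len(grid) (whose cell (i, len(row_i)) would raise IndexError in A's row-major
-- scan), some failing cell (zero on a diagonal, or positive off both diagonals)
-- occurs strictly earlier in the scan, so A early-returns False before the raise.
-- Outside Pre_ (a short row reached before any failing cell) A raises IndexError
-- while B returns False.
def Pre_checkXMatrix (grid : List (List Int)) : Prop :=
  ∀ i < grid.length,
    grid.length ≤ (grid.getD i []).length ∨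
    ∃ p < grid.length, ∃ q < grid.length,
      q < (grid.getD p []).length ∧
      (p < i ∨ (p = i ∧ q < (grid.getD i []).length)) ∧
      (if p = q ∨ p + q = grid.length - 1
        then (grid.getD p []).getD q 0 = 0
        else (grid.getD p []).getD q 0 > 0)
instance (grid : List (List Int)) : Decidable (Pre_checkXMatrix grid) := by
  unfold Pre_checkXMatrix; infer_instance

def pvWitness_checkXMatrix : List (List Int) := [[2, 0, 1], [0, 3, 0], [4, 0, 5]]

def Spec_checkXMatrix (grid : List (List Int)) (out : Bool) : Prop := out = checkXMatrix_alt grid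
instance (grid : List (List Int)) (out : Bool) : Decidable (Spec_checkXMatrix grid out) := by unfold Spec_checkXMatrix; infer_instance

-- ===== CLAIM (what is proved, stated in full; the proofs are below) =====
def Claim_equal_checkXMatrix : Prop := ∀ (grid : List (List Int)), Dom_checkXMatrix grid → Pre_checkXMatrix grid → Spec_checkXMatrix grid (checkXMatrix grid)

-- ===== LEMMAS AND PROOFS =====

-- the per-cell pass/fail test A implements
def pvOK (grid : List (List Int)) (n i j : Nat) : Bool :=
  if i = j ∨ i + j = n - 1 then pvCell grid i j ≠ 0 else ¬ pvCell grid i j > 0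

theorem pvAInner_eq (grid : List (List Int)) (n i : Nat) (js : List Nat) :
    pvAInner grid n i js = js.all (pvOK grid n i) := by
  induction js with
  | nil => rfl
  | cons j js ih =>
    simp only [pvAInner, pvOK, List.all_cons]
    split_ifs with h1 h2 h3
    · simp [h2]
    · simp [h2, ih]
    · simp [h3]
    · simp [h3, ih]

theorem pvAOuter_eq (grid : List (List Int)) (n : Nat) (is : List Nat) :
    pvAOuter grid n is = is.all (fun i => (List.range n).all (pvOK grid n i)) := by
  induction is with
  | nil => rfl
  | cons i is ih => simp [pvAOuter, pvAInner_eq, ih]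

theorem mem_pvPositives (grid : List (List Int)) (n : Nat) (p : Nat × Nat) :
    p ∈ pvPositives grid n ↔ p.1 < n ∧ p.2 < n ∧ pvCell grid p.1 p.2 > 0 := by
  unfold pvPositives
  rw [PySem.Set.mem_ofList]
  simp only [List.mem_flatMap, List.mem_map, List.mem_filter, List.mem_range,
    decide_eq_true_eq]
  constructor
  · rintro ⟨i, hi, j, ⟨hj, hpos⟩, rfl⟩; exact ⟨hi, hj, hpos⟩
  · rintro ⟨h1, h2, h3⟩; exact ⟨p.1, h1, p.2, ⟨h2, h3⟩, rfl⟩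

theorem mem_pvAllowed (n i j : Nat) :
    (i, j) ∈ pvAllowed n ↔ (i < n ∧ (j = i ∨ j = n - 1 - i)) := by
  unfold pvAllowed
  rw [PySem.Set.mem_union, PySem.Set.mem_ofList]
  simp only [List.mem_map, List.mem_range, Prod.mk.injEq]
  constructor
  · rintro (⟨a, ha, rfl, rfl⟩ | ⟨a, ha, rfl, rfl⟩) <;> simp_all
  · rintro ⟨h1, rfl | rfl⟩
    · exact Or.inl ⟨_, h1, rfl, rfl⟩
    · exact Or.inr ⟨_, h1, rfl, rfl⟩

theorem pvAOuter_false (grid : List (List Int)) (p q : Nat)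
    (hp : p < grid.length) (hq : q < grid.length)
    (hfail : pvOK grid grid.length p q = false) :
    checkXMatrix grid = false := by
  unfold checkXMatrix
  rw [pvAOuter_eq]
  simp only [List.all_eq_false, List.mem_range, Bool.not_eq_true]
  exact ⟨p, hp, q, hq, hfail⟩

-- ===== VERDICT (by name: the statement is the Claim_ definition above) =====
theorem checkXMatrix_spec : Claim_equal_checkXMatrix := by
  intro grid _ hpre
  unfold Spec_checkXMatrix
  by_cases hshort : grid.any (fun row => row.length < grid.length) = true
  · have hB : checkXMatrix_alt grid = false := by
      simp [checkXMatrix_alt, hshort]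
    rw [hB]
    simp only [List.any_eq_true, decide_eq_true_eq] at hshort
    obtain ⟨row, hrow, hlen⟩ := hshort
    obtain ⟨i, hi, hgi⟩ := List.mem_iff_getElem.mp hrow
    rcases hpre i hi with hlong | ⟨p, hp, q, hq, hqlen, _, hfail⟩
    · rw [List.getD_eq_getElem _ _ hi, hgi] at hlong; omega
    · refine pvAOuter_false grid p q hp hq ?_
      unfold pvOK pvCell
      split_ifs at hfail ⊢ with hdiag <;> simp_all
  · have hshort' : grid.any (fun row => row.length < grid.length) = false :=
      Bool.eq_false_iff.mpr hshort
    set n := grid.length with hn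
    by_cases hsub : PySem.Set.issubset (pvPositives grid n) (pvAllowed n) = true
    · have hB : checkXMatrix_alt grid = ((List.range n).all fun i =>
          decide (pvCell grid i i ≠ 0) && decide (pvCell grid i (n - 1 - i) ≠ 0)) := by
        simp [checkXMatrix_alt, hshort', ← hn, hsub]
      rw [hB]
      unfold checkXMatrix
      rw [pvAOuter_eq, ← hn, Bool.eq_iff_iff]
      simp only [List.all_eq_true, List.mem_range, Bool.and_eq_true, decide_eq_true_eq, pvOK]
      rw [PySem.Set.issubset_iff] at hsub
      constructor
      · intro h i hi
        have h1 := h i hi i hi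
        have h2 := h i hi (n - 1 - i) (by omega)
        rw [if_pos (Or.inl rfl)] at h1
        rw [if_pos (Or.inr (by omega))] at h2
        simp only [decide_eq_true_eq] at h1 h2
        exact ⟨h1, h2⟩
      · intro h i hi j hj
        split_ifs with hdiag
        · rcases hdiag with h1 | h2
          · subst h1; simpa [pvCell, pvCell] using (h i hi).1
          · have hj' : j = n - 1 - i := by omega
            subst hj'; simpa [pvCell, pvCell] using (h i hi).2
        · simp only [decide_eq_true_eq]
          intro hc
          have := hsub (i, j) ((mem_pvPositives grid n (i, j)).mpr ⟨hi, hj, by simpa [pvCell, pvCell] using hc⟩)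
          rw [mem_pvAllowed] at this
          exact hdiag (by rcases this.2 with h1 | h2 <;> [exact Or.inl h1.symm; (right; omega)])
    · have hsub' : PySem.Set.issubset (pvPositives grid n) (pvAllowed n) = false :=
        Bool.eq_false_iff.mpr hsub
      have hB : checkXMatrix_alt grid = false := by
        simp [checkXMatrix_alt, hshort', ← hn, hsub']
      rw [hB]
      rw [PySem.Set.issubset_iff] at hsub
      push Not at hsub
      obtain ⟨⟨p, q⟩, hmem, hnot⟩ := hsub
      rw [mem_pvPositives] at hmem
      obtain ⟨hp, hq, hpos⟩ := hmem
      rw [mem_pvAllowed] at hnot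
      simp only [not_and_or, not_or] at hnot
      refine pvAOuter_false grid p q hp hq ?_
      unfold pvOK
      rw [if_neg ?_]
      · simpa [pvCell, pvCell] using hpos
      · have hc := hnot.resolve_left (not_not_intro hp)
        rintro (rfl | hsum)
        · exact hc.1 rfl
        · exact hc.2 (by omega)
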